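-- pv_equiv track=rewrite | github.com/YueXiao1995/toolkit_for_algorithm_engineering | leetcode/python/2310 Sum of Numbers With Units Digit K.py | minimumNumbers
-- ===== SOURCE A (Python) =====
-- def minimumNumbers(num, k):
--     """
--     :type num: int
--     :type k: int
--     :rtype: int
--     """
--
--     if num == 0:
--         return 0
--
--     # 求的个位数为k的数字相加后，和的所有可能的个位数，及得到该个位数的最小相加次数
--     possible_units_digit = dict()
--     digit = k
--     size = 1
--     while True:
--         units_digit = str(digit)[-1]
--         if units_digit in possible_units_digit:
--             break
--         else:
--             possible_units_digit[units_digit] = size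
--         digit += k
--         size += 1
--
--     # 输入数字的个位数（目标个位数）
--     units_digit = str(num)[-1]
--     # 最小集合size
--     min_size = -1
--     # 判断"目标个位数" 是否在 "可能个位数"集合中
--     if units_digit in possible_units_digit:
--         size = possible_units_digit[units_digit]
--         # 确保输入数 大于等于 最小的可能个位数 * 最小相加次数，避免 num=17，k=9的情况
--         if num >= k * size:
--             min_size = size
--
--     return min_size
-- ===== SOURCE B (Python) =====
-- def minimumNumbers(num, k):
--     """
--     :type num: int
--     :type k: int
--     :rtype: int
--     """
--     if num == 0:
--         return 0
--     # solve the congruence size * |k| = |num| (mod 10) in closed form: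
--     # with g = gcd(|k|%10, 10) a solution exists iff g divides the target digit,
--     # and then size = (t/g) * inverse(r/g mod 10/g) mod 10/g (0 standing for 10/g).
--     t = abs(num) % 10
--     r = abs(k) % 10
--     # gcd(r, 10) read off the divisor lattice of 10
--     g = 10 if r == 0 else (5 if r == 5 else (2 if r % 2 == 0 else 1))
--     if t % g:
--         return -1
--     m = 10 // g
--     # for every m dividing 10, a**3 % m is the inverse of a mod m (Carmichael lambda(m) | 4)
--     s0 = ((t // g) * (r // g) ** 3) % m
--     s = s0 if s0 else m
--     return s if num >= k * s else -1
-- ===== Notes on version B (the rewrite author's own statement) =====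
-- stated objective: alternative
-- what changed: A enumerates multiples of k, building a dict from units digits to the first count reaching them, then looks the target digit up; B solves the linear congruence size*|k| = |num| (mod 10) in closed form -- gcd solvability test, then the modular inverse (a**3 % m, since lambda(m) | 4 for every m dividing 10) -- with no enumeration, no dict, no loop at all.
import Mathlib
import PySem

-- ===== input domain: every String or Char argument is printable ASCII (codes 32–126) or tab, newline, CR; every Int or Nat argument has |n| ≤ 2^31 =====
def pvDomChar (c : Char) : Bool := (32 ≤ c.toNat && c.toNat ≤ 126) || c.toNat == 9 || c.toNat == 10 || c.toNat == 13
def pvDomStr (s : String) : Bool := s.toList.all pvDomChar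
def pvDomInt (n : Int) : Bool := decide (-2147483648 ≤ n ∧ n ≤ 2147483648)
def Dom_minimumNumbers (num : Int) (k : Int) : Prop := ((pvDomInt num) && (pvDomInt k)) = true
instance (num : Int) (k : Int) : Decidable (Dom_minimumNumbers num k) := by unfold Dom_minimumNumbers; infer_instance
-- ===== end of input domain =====

-- B replaces A's enumerate-multiples/build-a-dict/look-up with a loop-free closed form:
-- solve size*|k| ≡ |num| (mod 10) by gcd test + modular inverse (objective: alternative).

-- ===== PORT A =====
-- the `while True` loop of A: it always breaks within 11 iterations (at most 10 distinct
-- units-digit keys exist, and each non-break iteration inserts a new one), so fuel 11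
-- only makes the recursion total and is never exhausted.
def minimumNumbersLoop (k : Int) : Nat → Int → Int → PySem.Dict Char Int → PySem.Dict Char Int
  | 0, _, _, d => d
  | fuel + 1, digit, size, d =>
    let units_digit := PySem.List.pyGetD (PySem.Int.toChars digit) (-1) ' '   -- str(digit)[-1]; str(digit) is never empty
    if d.contains units_digit then d
    else minimumNumbersLoop k fuel (digit + k) (size + 1) (d.insert units_digit size)

def minimumNumbers (num : Int) (k : Int) : Int :=
  if num == 0 then 0
  else
    let possible := minimumNumbersLoop k 11 k 1 PySem.Dict.empty
    let units_digit := PySem.List.pyGetD (PySem.Int.toChars num) (-1) ' '   -- str(num)[-1]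
    let min_size : Int := -1
    if possible.contains units_digit then
      let size := possible.getD units_digit 0
      if num ≥ k * size then size else min_size
    else min_size

-- ===== PORT B =====
-- loop-free: g = gcd(|k|%10, 10) read off the divisor lattice of 10, solvability test
-- t % g == 0, then modular inverse of r/g mod 10/g as (r/g)^3 % (10/g).
def minimumNumbers_alt (num : Int) (k : Int) : Int :=
  if num == 0 then 0
  else
    let t := num.natAbs % 10                 -- abs(num) % 10
    let r := k.natAbs % 10                   -- abs(k) % 10
    let g := if r == 0 then 10 else if r == 5 then 5 else if r % 2 == 0 then 2 else 1
    if t % g != 0 then -1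
    else
      let m := 10 / g
      let s0 := (t / g) * (r / g) ^ 3 % m
      let s := if s0 == 0 then m else s0
      if num ≥ k * (s : Int) then (s : Int) else -1

-- ===== PRECONDITION & SPEC =====
def Spec_minimumNumbers (num : Int) (k : Int) (out : Int) : Prop := out = minimumNumbers_alt num k
instance (num : Int) (k : Int) (out : Int) : Decidable (Spec_minimumNumbers num k out) := by unfold Spec_minimumNumbers; infer_instance

-- ===== CLAIM (what is proved, stated in full; the proofs are below) =====
def Claim_equal_minimumNumbers : Prop := ∀ (num : Int) (k : Int), Dom_minimumNumbers num k → Spec_minimumNumbers num k (minimumNumbers num k)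

-- ===== LEMMAS AND PROOFS =====

-- Nat.toDigitsCore preserves the last element of a nonempty accumulator
lemma pvToDigitsCore_getLast? : ∀ (f n : Nat) (c : Char) (tl : List Char),
    (Nat.toDigitsCore 10 f n (c :: tl)).getLast? = (c :: tl).getLast? := by
  intro f
  induction f with
  | zero => intro n c tl; rfl
  | succ f ih =>
    intro n c tl
    simp only [Nat.toDigitsCore]
    split
    · exact List.getLast?_cons_cons ..
    · rw [ih]; exact List.getLast?_cons_cons ..

-- the last character of the decimal digit string of m is the digit char of m % 10
lemma pvGetLast?_toDigits (m : Nat) :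
    (Nat.toDigits 10 m).getLast? = some (Nat.digitChar (m % 10)) := by
  unfold Nat.toDigits
  show (Nat.toDigitsCore 10 (m + 1) m []).getLast? = _
  simp only [Nat.toDigitsCore]
  split
  · rfl
  · rw [pvToDigitsCore_getLast?]; rfl

-- str(n)[-1] is the digit char of |n| % 10 (a possible '-' sign sits at the front)
lemma pvLastChar (n : Int) :
    PySem.List.pyGetD (PySem.Int.toChars n) (-1) ' ' = Nat.digitChar (n.natAbs % 10) := by
  have key : (PySem.Int.toChars n).getLast? = some (Nat.digitChar (n.natAbs % 10)) := by
    unfold PySem.Int.toChars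
    split
    · rw [List.getLast?_cons]
      simp [pvGetLast?_toDigits n.natAbs]
    · rename_i h
      have : n.toNat = n.natAbs := by omega
      rw [this, pvGetLast?_toDigits]
  have hne : PySem.Int.toChars n ≠ [] := by
    intro h; rw [h] at key; simp at key
  rw [PySem.List.pyGetD_neg_one _ _ hne]
  have := List.getLast?_eq_some_getLast hne
  rw [this] at key
  exact Option.some.inj key

-- residue-only version of A's dict-building loop: step j inserts the digit char of (j*r) % 10
def pvPureLoop (r : Nat) : Nat → Nat → Int → PySem.Dict Char Int → PySem.Dict Char Int
  | 0, _, _, d => d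
  | fuel + 1, j, size, d =>
    let c := Nat.digitChar (j * r % 10)
    if d.contains c then d
    else pvPureLoop r fuel (j + 1) (size + 1) (d.insert c size)

-- A's loop started at digit = j*k only depends on the residue r = |k| % 10
lemma pvLoop_eq (k : Int) : ∀ (fuel j : Nat) (size : Int) (d : PySem.Dict Char Int),
    minimumNumbersLoop k fuel ((j : Int) * k) size d = pvPureLoop (k.natAbs % 10) fuel j size d := by
  intro fuel
  induction fuel with
  | zero => intro j size d; rfl
  | succ f ih =>
    intro j size d
    show (let units_digit := PySem.List.pyGetD (PySem.Int.toChars ((j : Int) * k)) (-1) ' ';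
          if d.contains units_digit then d
          else minimumNumbersLoop k f ((j : Int) * k + k) (size + 1) (d.insert units_digit size)) = _
    have hc : PySem.List.pyGetD (PySem.Int.toChars ((j : Int) * k)) (-1) ' '
        = Nat.digitChar (j * (k.natAbs % 10) % 10) := by
      rw [pvLastChar]
      congr 1
      rw [Int.natAbs_mul, Int.natAbs_natCast]
      conv_lhs => rw [Nat.mul_mod]
      conv_rhs => rw [Nat.mul_mod]
      simp
    have hd : (j : Int) * k + k = ((j + 1 : Nat) : Int) * k := by push_cast; ring
    simp only [hc, hd, ih]
    rfl

-- residue-only version of B's closed form: the size solving s*r ≡ t (mod 10), if any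
def pvClosed (r t : Nat) : Option Nat :=
  let g := if r == 0 then 10 else if r == 5 then 5 else if r % 2 == 0 then 2 else 1
  if t % g != 0 then none
  else
    let m := 10 / g
    let s0 := (t / g) * (r / g) ^ 3 % m
    some (if s0 == 0 then m else s0)

-- the dict lookup of A and the closed form of B agree on all 100 residue pairs
lemma pvTable : ∀ r < 10, ∀ t < 10,
    (pvPureLoop r 11 1 1 PySem.Dict.empty).get? (Nat.digitChar t)
      = (pvClosed r t).map (fun s => (s : Int)) := by
  decide

-- B, written through pvClosed (the two if-trees are the same computation)
lemma pvAlt_eq (num k : Int) (h0 : ¬ num == 0) :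
    minimumNumbers_alt num k
      = match pvClosed (k.natAbs % 10) (num.natAbs % 10) with
        | some s => if num ≥ k * (s : Int) then (s : Int) else -1
        | none => -1 := by
  unfold minimumNumbers_alt pvClosed
  simp only [h0, Bool.false_eq_true, if_false]
  split_ifs <;> first | rfl | exact (if_pos ‹_›).symm | exact (if_neg ‹_›).symm

-- ===== VERDICT (by name: the statement is the Claim_ definition above) =====
theorem minimumNumbers_spec : Claim_equal_minimumNumbers := by
  intro num k _
  unfold Spec_minimumNumbers
  by_cases h0 : num == 0
  · unfold minimumNumbers minimumNumbers_alt
    simp [h0]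
  · rw [pvAlt_eq num k h0]
    unfold minimumNumbers
    simp only [h0, Bool.false_eq_true, if_false]
    have hloop : minimumNumbersLoop k 11 k 1 PySem.Dict.empty
        = pvPureLoop (k.natAbs % 10) 11 1 1 PySem.Dict.empty := by
      have := pvLoop_eq k 11 1 1 PySem.Dict.empty
      simpa using this
    rw [hloop, pvLastChar]
    have htab := pvTable (k.natAbs % 10) (Nat.mod_lt _ (by norm_num))
      (num.natAbs % 10) (Nat.mod_lt _ (by norm_num))
    rw [PySem.Dict.contains_eq_isSome_get?, PySem.Dict.getD_eq_get?_getD, htab]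
    cases pvClosed (k.natAbs % 10) (num.natAbs % 10) with
    | none => simp
    | some s => simp
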